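-- pv_equiv track=rewrite | github.com/TacticalMetaphysics/LiSE | ELiDE/ELiDE/board/board.py | detect_2d_grid_layout_bounds
-- ===== SOURCE A (Python) =====
-- def detect_2d_grid_layout_bounds(nodenames):
--     minx = miny = maxx = maxy = None
--     for nn in nodenames:
--         if not isinstance(nn, tuple) or len(nn) != 2:
--             raise ValueError("Not a 2d grid layout")
--         x, y = nn
--         if minx is None or x < minx:
--             minx = x
--         if maxx is None or x > maxx:
--             maxx = x
--         if miny is None or y < miny:
--             miny = y
--         if maxy is None or y > maxy:
--             maxy = y
--     return minx, miny, maxx, maxy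
-- ===== SOURCE B (Python) =====
-- def detect_2d_grid_layout_bounds(nodenames):
--     xs = []
--     ys = []
--     for nn in nodenames:
--         if not isinstance(nn, tuple) or len(nn) != 2:
--             raise ValueError("Not a 2d grid layout")
--         x, y = nn
--         xs.append(x)
--         ys.append(y)
--     if not xs:
--         return (None, None, None, None)
--     return (min(xs), min(ys), max(xs), max(ys))
-- ===== Notes on version B (the rewrite author's own statement) =====
-- stated objective: idiomatic
-- what changed: Replaces the fused four-accumulator Option-sentinel loop with collect-the-coordinates-then-reduce via the min/max builtins, with an explicit empty guard.
import Mathlib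
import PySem

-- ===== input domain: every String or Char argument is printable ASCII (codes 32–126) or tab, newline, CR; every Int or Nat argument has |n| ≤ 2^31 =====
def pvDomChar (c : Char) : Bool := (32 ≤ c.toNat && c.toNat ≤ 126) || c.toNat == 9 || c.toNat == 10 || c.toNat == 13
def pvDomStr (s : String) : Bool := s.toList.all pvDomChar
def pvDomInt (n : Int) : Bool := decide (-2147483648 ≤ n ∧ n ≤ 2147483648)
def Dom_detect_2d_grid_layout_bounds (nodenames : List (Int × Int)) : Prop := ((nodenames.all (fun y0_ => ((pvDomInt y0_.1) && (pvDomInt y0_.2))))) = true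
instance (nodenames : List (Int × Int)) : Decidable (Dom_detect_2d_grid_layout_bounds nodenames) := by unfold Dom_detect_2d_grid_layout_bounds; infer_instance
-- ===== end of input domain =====

-- B replaces A's fused four-accumulator Option-sentinel loop with collect-then-reduce via min/max (idiomatic; same cost).

-- ===== PORT A =====
-- one fused loop carrying four Option accumulators, branches in A's order (loop body = pvStepA)
def pvStepA (s : Option Int × Option Int × Option Int × Option Int) (nn : Int × Int) : Option Int × Option Int × Option Int × Option Int :=
  let (minx, miny, maxx, maxy) := s
  let (x, y) := nn
  let minx := match minx with | none => some x | some m => if x < m then some x else some m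
  let maxx := match maxx with | none => some x | some m => if x > m then some x else some m
  let miny := match miny with | none => some y | some m => if y < m then some y else some m
  let maxy := match maxy with | none => some y | some m => if y > m then some y else some m
  (minx, miny, maxx, maxy)

def detect_2d_grid_layout_bounds (nodenames : List (Int × Int)) : Option Int × Option Int × Option Int × Option Int :=
  nodenames.foldl pvStepA (none, none, none, none)

-- ===== PORT B =====
-- collect xs and ys, then reduce with min/max (Python min/max with no key = PySem.List.min?/max? with identity key)
def detect_2d_grid_layout_bounds_alt (nodenames : List (Int × Int)) : Option Int × Option Int × Option Int × Option Int :=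
  let xs := nodenames.map (fun nn => nn.1)
  let ys := nodenames.map (fun nn => nn.2)
  if xs = [] then (none, none, none, none)
  else (PySem.List.min? xs (fun v => v), PySem.List.min? ys (fun v => v),
        PySem.List.max? xs (fun v => v), PySem.List.max? ys (fun v => v))

-- ===== PRECONDITION & SPEC =====
def Spec_detect_2d_grid_layout_bounds (nodenames : List (Int × Int)) (out : Option Int × Option Int × Option Int × Option Int) : Prop := out = detect_2d_grid_layout_bounds_alt nodenames
instance (nodenames : List (Int × Int)) (out : Option Int × Option Int × Option Int × Option Int) : Decidable (Spec_detect_2d_grid_layout_bounds nodenames out) := by unfold Spec_detect_2d_grid_layout_bounds; infer_instance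

-- ===== CLAIM (what is proved, stated in full; the proofs are below) =====
def Claim_equal_detect_2d_grid_layout_bounds : Prop := ∀ (nodenames : List (Int × Int)), Dom_detect_2d_grid_layout_bounds nodenames → Spec_detect_2d_grid_layout_bounds nodenames (detect_2d_grid_layout_bounds nodenames)

-- ===== LEMMAS AND PROOFS =====

-- the fused loop, started from four `some` accumulators, computes the running min/max folds componentwise
theorem pv_foldl_some (t : List (Int × Int)) : ∀ (a b c d : Int),
    t.foldl pvStepA (some a, some b, some c, some d)
    = (some ((t.map (fun nn => nn.1)).foldl min a),
       some ((t.map (fun nn => nn.2)).foldl min b),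
       some ((t.map (fun nn => nn.1)).foldl max c),
       some ((t.map (fun nn => nn.2)).foldl max d)) := by
  induction t with
  | nil => intro a b c d; simp
  | cons hd tl ih =>
    intro a b c d
    simp only [List.foldl_cons, List.map_cons, pvStepA]
    split_ifs <;>
      rw [ih] <;>
      simp only [Prod.mk.injEq, Option.some.injEq] <;>
      refine ⟨?_, ?_, ?_, ?_⟩ <;> congr 1 <;> omega

-- ===== VERDICT (by name: the statement is the Claim_ definition above) =====
theorem detect_2d_grid_layout_bounds_spec : Claim_equal_detect_2d_grid_layout_bounds := by
  intro nodenames _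
  show detect_2d_grid_layout_bounds nodenames = detect_2d_grid_layout_bounds_alt nodenames
  cases nodenames with
  | nil => rfl
  | cons hd tl =>
    unfold detect_2d_grid_layout_bounds detect_2d_grid_layout_bounds_alt
    simp only [List.foldl_cons, List.map_cons]
    rw [show pvStepA (none, none, none, none) hd = (some hd.1, some hd.2, some hd.1, some hd.2) from rfl]
    rw [pv_foldl_some]
    simp [PySem.List.min?_id_cons, PySem.List.max?_id_cons]
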